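-- pv_equiv track=rewrite | github.com/rogue0137/practice | leetcode_python/hard/palindrome-pairs.py | all_valid_prefixes
-- ===== SOURCE A (Python) =====
-- def all_valid_prefixes(word):
--     valid_prefixes = []
--     for i in range(len(word)):
--         word_beg_at_i = word[i:]
--         reversed_word = word_beg_at_i[::-1]
--         if word_beg_at_i == reversed_word:
--             word_up_to_i = word[:i]
--             valid_prefixes.append(word_up_to_i)
--     return valid_prefixes
-- ===== SOURCE B (Python) =====
-- def all_valid_prefixes(word):
--     n = len(word)
--     out = []
--     for i in range(n):
--         l, r = i, n - 1
--         while l < r and word[l] == word[r]: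
--             l += 1
--             r -= 1
--         if r <= l:
--             out.append(word[:i])
--     return out
-- ===== Notes on version B (the rewrite author's own statement) =====
-- stated objective: alternative
-- what changed: A reverses a freshly sliced copy of every suffix and compares whole strings; B never materialises a suffix or its reverse: it runs an in-place two-pointer scan (l from i, r from the end) with early exit at the first mismatch.
import Mathlib
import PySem

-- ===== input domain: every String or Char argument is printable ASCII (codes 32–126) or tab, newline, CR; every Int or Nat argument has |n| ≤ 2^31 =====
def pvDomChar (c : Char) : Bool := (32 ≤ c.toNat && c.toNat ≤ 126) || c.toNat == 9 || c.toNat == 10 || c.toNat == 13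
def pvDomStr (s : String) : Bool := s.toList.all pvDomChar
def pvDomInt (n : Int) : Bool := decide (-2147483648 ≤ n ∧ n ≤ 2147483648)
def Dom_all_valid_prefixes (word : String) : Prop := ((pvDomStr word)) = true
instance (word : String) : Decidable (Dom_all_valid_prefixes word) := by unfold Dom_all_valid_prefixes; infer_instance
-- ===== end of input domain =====

-- B replaces A's per-suffix reverse-and-compare (a reversed copy of every suffix) with an
-- in-place two-pointer palindrome check that stops at the first mismatch; same results.

-- ===== PORT A =====
def all_valid_prefixes (word : String) : List String :=
  (PySem.List.pyRange 0 (PySem.Chars.len word.toList) 1).foldl (fun valid_prefixes i =>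
    let word_beg_at_i := PySem.List.slice word.toList (some i) none
    let reversed_word := (PySem.List.slice? word_beg_at_i none none (-1)).getD []
    if word_beg_at_i == reversed_word then
      valid_prefixes ++ [String.ofList (PySem.List.slice word.toList none (some i))]
    else valid_prefixes) []

-- ===== PORT B =====
-- the inner `while l < r and word[l] == word[r]` loop of Source B (returns the final l, r)
def bLoop (cs : List Char) (l r : Int) : Int × Int :=
  if l < r && ((PySem.List.pyGet? cs l).getD 'a' == (PySem.List.pyGet? cs r).getD 'a') then
    bLoop cs (l + 1) (r - 1)
  else (l, r)
termination_by (r - l).toNat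
decreasing_by simp_all; omega

def all_valid_prefixes_alt (word : String) : List String :=
  let cs := word.toList
  let n := PySem.Chars.len cs
  (PySem.List.pyRange 0 n 1).foldl (fun out i =>
    let p := bLoop cs i (n - 1)
    if p.2 ≤ p.1 then out ++ [String.ofList (PySem.List.slice cs none (some i))]
    else out) []

-- ===== PRECONDITION & SPEC =====
def Spec_all_valid_prefixes (word : String) (out : List String) : Prop := out = all_valid_prefixes_alt word
instance (word : String) (out : List String) : Decidable (Spec_all_valid_prefixes word out) := by unfold Spec_all_valid_prefixes; infer_instance

-- ===== CLAIM (what is proved, stated in full; the proofs are below) =====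
def Claim_equal_all_valid_prefixes : Prop := ∀ (word : String), Dom_all_valid_prefixes word → Spec_all_valid_prefixes word (all_valid_prefixes word)

-- ===== LEMMAS AND PROOFS =====

-- a list of at most one element is its own reverse
lemma short_pal (t : List Char) (h : t.length ≤ 1) : t = t.reverse := by
  match t with
  | [] => rfl
  | [a] => rfl
  | a :: b :: r => simp at h

-- peeling both ends of a palindrome candidate
lemma peel (a b : Char) (m : List Char) :
    (a :: (m ++ [b]) = (a :: (m ++ [b])).reverse) ↔ (a = b ∧ m = m.reverse) := by
  rw [List.reverse_cons, List.reverse_append, List.reverse_singleton, List.singleton_append,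
    List.cons_append, List.cons.injEq]
  constructor
  · rintro ⟨rfl, h⟩
    exact ⟨rfl, (List.append_left_inj [a]).mp h⟩
  · rintro ⟨rfl, h⟩
    exact ⟨rfl, by rw [← h]⟩

-- the segment cs[l..r] decomposes as first element, middle, last element
lemma seg_decomp (cs : List Char) (l r : ℕ) (hlr : l < r) (hr : r < cs.length) :
    (cs.drop l).take (r + 1 - l) = cs[l] :: (((cs.drop (l + 1)).take (r - 1 - l)) ++ [cs[r]]) := by
  rw [List.drop_eq_getElem_cons (by omega : l < cs.length)]
  have h2 : (cs.drop (l + 1))[r - 1 - l]? = some cs[r] := by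
    rw [List.getElem?_drop]
    have : l + 1 + (r - 1 - l) = r := by omega
    rw [this, List.getElem?_eq_getElem hr]
  have h1 : r + 1 - l = (r - 1 - l) + 1 + 1 := by omega
  rw [h1, List.take_succ_cons, List.take_add_one, h2]
  simp

-- the two-pointer loop's verdict `r ≤ l` holds iff the segment cs[l..r] is a palindrome
lemma bLoop_iff (cs : List Char) (k : ℕ) : ∀ (l r : Int), (r - l).toNat ≤ k → 0 ≤ l → r < cs.length →
    (((bLoop cs l r).2 ≤ (bLoop cs l r).1) ↔
      ((cs.drop l.toNat).take ((r + 1 - l).toNat)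
        = ((cs.drop l.toNat).take ((r + 1 - l).toNat)).reverse)) := by
  induction k with
  | zero =>
    intro l r hk h0 hr
    have hlr : ¬ (l < r) := by omega
    rw [bLoop]
    simp [hlr]
    constructor
    · intro _
      exact short_pal _ (le_trans (List.length_take_le _ _) (by omega))
    · intro _; omega
  | succ k ih =>
    intro l r hk h0 hr
    by_cases hlr : l < r
    · have hlN : l.toNat < cs.length := by omega
      have hrN : r.toNat < cs.length := by omega
      have hlrN : l.toNat < r.toNat := by omega
      have hget : (PySem.List.pyGet? cs l).getD 'a' = cs[l.toNat] := by
        show PySem.List.pyGetD cs l 'a' = _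
        rw [PySem.List.pyGetD_of_nonneg _ _ h0, List.getD_eq_getElem _ _ hlN]
      have hgetr : (PySem.List.pyGet? cs r).getD 'a' = cs[r.toNat] := by
        show PySem.List.pyGetD cs r 'a' = _
        rw [PySem.List.pyGetD_of_nonneg _ _ (by omega), List.getD_eq_getElem _ _ hrN]
      have hseg : (r + 1 - l).toNat = r.toNat + 1 - l.toNat := by omega
      rw [bLoop, hget, hgetr]
      rw [hseg, seg_decomp cs l.toNat r.toNat hlrN hrN]
      by_cases hab : cs[l.toNat] = cs[r.toNat]
      · simp only [hlr, decide_true, Bool.true_and, hab, beq_self_eq_true, if_true]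
        rw [ih (l + 1) (r - 1) (by omega) (by omega) (by omega)]
        rw [peel]
        have e1 : (l + 1).toNat = l.toNat + 1 := by omega
        have e2 : (r - 1 + 1 - (l + 1)).toNat = r.toNat - 1 - l.toNat := by omega
        rw [e1, e2]
        simp
      · simp only [hlr, decide_true, Bool.true_and]
        simp only [beq_iff_eq, hab, if_false]
        rw [peel]
        constructor
        · intro h; omega
        · rintro ⟨h, -⟩; exact absurd h hab
    · rw [bLoop]
      simp [hlr]
      constructor
      · intro _
        exact short_pal _ (le_trans (List.length_take_le _ _) (by omega))
      · intro _; omega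

-- A's per-iteration test `word[i:] == word[i:][::-1]` says: the suffix at i is a palindrome
lemma condA_iff (cs : List Char) (i : Int) (h0 : 0 ≤ i) :
    ((PySem.List.slice cs (some i) none
        == (PySem.List.slice? (PySem.List.slice cs (some i) none) none none (-1)).getD []) = true)
      ↔ (cs.drop i.toNat = (cs.drop i.toNat).reverse) := by
  rw [PySem.List.slice_from cs h0, PySem.List.slice?_none_none_neg_one]
  simp

theorem main (word : String) : all_valid_prefixes word = all_valid_prefixes_alt word := by
  unfold all_valid_prefixes all_valid_prefixes_alt
  apply PySem.List.foldl_congr_mem'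
  intro i hi acc
  obtain ⟨h0, hin⟩ := PySem.List.mem_pyRange_one.mp hi
  have hlen : PySem.Chars.len word.toList = (word.toList.length : Int) := PySem.Chars.len_eq _
  dsimp only
  apply if_congr ?_ rfl rfl
  rw [condA_iff word.toList i h0,
    bLoop_iff word.toList (PySem.Chars.len word.toList - 1 - i).toNat i
      (PySem.Chars.len word.toList - 1) (by omega) h0 (by omega)]
  have e1 : ((PySem.Chars.len word.toList - 1) + 1 - i).toNat = word.toList.length - i.toNat := by
    omega
  rw [e1, List.take_of_length_le (by rw [List.length_drop])]

-- ===== VERDICT (by name: the statement is the Claim_ definition above) =====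
theorem all_valid_prefixes_spec : Claim_equal_all_valid_prefixes := by
  intro word _
  exact main word
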